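-- pv_equiv track=rewrite | github.com/Ravi-0412/DSA-Program-And-Notes | Recursion_and_String/subsequences with ascii.py | subset1
-- ===== SOURCE A (Python) =====
-- def subset1(str1,ans):
--     if not str1:  # if empty then that will be one of the subset and that will be in 'ans'
--         local=[ans]
--         return local
--     first= subset1(str1[1:], ans + str1[0])  # when you include the current character
--     second= subset1(str1[1:], ans)   # when you don't include the current character
--     third= subset1(str1[1:],ans + str(ord(str1[0])))   # include the ascii value of the character
--     return first + second + third
-- ===== SOURCE B (Python) =====
-- def subset1(str1, ans):
--     results = [ans]
--     for ch in str1: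
--         results = [x for r in results
--                      for x in (r + ch, r, r + str(ord(ch)))]
--     return results
-- ===== Notes on version B (the rewrite author's own statement) =====
-- stated objective: alternative
-- what changed: Replaced the triple-branch recursion with an iterative breadth-wise builder: start from [ans] and for each character expand every partial string into its include/exclude/ascii variants in one comprehension.
import Mathlib
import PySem

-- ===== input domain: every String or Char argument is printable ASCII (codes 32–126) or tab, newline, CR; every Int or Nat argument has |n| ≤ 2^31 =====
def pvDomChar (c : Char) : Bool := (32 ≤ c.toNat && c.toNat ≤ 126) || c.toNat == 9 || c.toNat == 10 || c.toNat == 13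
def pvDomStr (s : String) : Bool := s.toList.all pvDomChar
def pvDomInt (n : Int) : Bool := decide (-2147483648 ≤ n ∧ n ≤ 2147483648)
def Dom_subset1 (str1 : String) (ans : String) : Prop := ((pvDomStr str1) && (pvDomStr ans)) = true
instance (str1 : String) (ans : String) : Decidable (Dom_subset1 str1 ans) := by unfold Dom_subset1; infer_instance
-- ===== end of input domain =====

-- B rebuilds the 3^n subsequence list iteratively (fold over the characters expanding every partial string) instead of A's triple recursion; alternative decomposition, same order and cost.


-- ===== PORT A =====
-- structural recursion over the character list of str1, mirroring A's
-- `if not str1 … first/second/third` with str1[0] / str1[1:] as head / tail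
def subset1Aux : List Char → String → List String
  | [], ans => [ans]
  | c :: rest, ans =>
    let first := subset1Aux rest (ans ++ c.toString)
    let second := subset1Aux rest ans
    let third := subset1Aux rest (ans ++ PySem.Int.toStr (c.toNat : Int))
    first ++ second ++ third

def subset1 (str1 : String) (ans : String) : List String :=
  subset1Aux str1.toList ans

-- ===== PORT B =====
-- Source B's loop: results = [ans]; for ch in str1: results = [x for r in results for x in (r+ch, r, r+str(ord(ch)))]
def subset1Step (results : List String) (c : Char) : List String :=
  results.flatMap (fun r => [r ++ c.toString, r, r ++ PySem.Int.toStr (c.toNat : Int)])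

def subset1_alt (str1 : String) (ans : String) : List String :=
  str1.toList.foldl subset1Step [ans]

-- ===== PRECONDITION & SPEC =====
def Spec_subset1 (str1 : String) (ans : String) (out : List String) : Prop := out = subset1_alt str1 ans
instance (str1 : String) (ans : String) (out : List String) : Decidable (Spec_subset1 str1 ans out) := by unfold Spec_subset1; infer_instance

-- ===== CLAIM (what is proved, stated in full; the proofs are below) =====
def Claim_equal_subset1 : Prop := ∀ (str1 : String) (ans : String), Dom_subset1 str1 ans → Spec_subset1 str1 ans (subset1 str1 ans)

-- ===== LEMMAS AND PROOFS =====
theorem foldl_step_append (l : List Char) (a b : List String) :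
    l.foldl subset1Step (a ++ b) = l.foldl subset1Step a ++ l.foldl subset1Step b := by
  induction l generalizing a b with
  | nil => simp
  | cons c rest ih =>
    simp only [List.foldl_cons]
    rw [show subset1Step (a ++ b) c = subset1Step a c ++ subset1Step b c by
      simp [subset1Step], ih]

theorem subset1Aux_eq_foldl (l : List Char) (ans : String) :
    subset1Aux l ans = l.foldl subset1Step [ans] := by
  induction l generalizing ans with
  | nil => simp [subset1Aux]
  | cons c rest ih =>
    simp only [subset1Aux, List.foldl_cons, ih]
    rw [show subset1Step [ans] c
        = [ans ++ c.toString] ++ [ans] ++ [ans ++ PySem.Int.toStr (c.toNat : Int)] by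
      simp [subset1Step]]
    rw [foldl_step_append, foldl_step_append]

-- ===== VERDICT (by name: the statement is the Claim_ definition above) =====
theorem subset1_spec : Claim_equal_subset1 := by
  intro str1 ans _
  unfold Spec_subset1 subset1 subset1_alt
  exact subset1Aux_eq_foldl _ _
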